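-- pv_equiv track=rewrite | github.com/ricmmartins/azure-environment-advisor | scripts/generate-trend-dashboard.py | diff_findings
-- ===== SOURCE A (Python) =====
-- SEVERITY_ORDER = {"Critical": 4, "High": 3, "Medium": 2, "Low": 1, "Informational": 0}
--
-- def diff_findings(old_baseline, new_baseline):
--     """Compute new, resolved, escalated, de-escalated findings between two baselines."""
--     old_ids = {f["rule_id"]: f for f in old_baseline.get("findings", [])
--                if f.get("status", "finding") != "exception"}
--     new_ids = {f["rule_id"]: f for f in new_baseline.get("findings", [])
--                if f.get("status", "finding") != "exception"}
--
--     result = {"new": [], "resolved": [], "escalated": [], "de_escalated": []}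
--
--     for rid in sorted(set(old_ids) | set(new_ids)):
--         old = old_ids.get(rid)
--         new = new_ids.get(rid)
--         if new and not old:
--             result["new"].append(new)
--         elif old and not new:
--             result["resolved"].append(old)
--         elif old and new:
--             o = SEVERITY_ORDER.get(old.get("severity", ""), 0)
--             n = SEVERITY_ORDER.get(new.get("severity", ""), 0)
--             if n > o:
--                 result["escalated"].append({
--                     "rule_id": rid, "title": new.get("title", ""),
--                     "from": old.get("severity", ""), "to": new.get("severity", ""),
--                 })
--             elif n < o:
--                 result["de_escalated"].append({
--                     "rule_id": rid, "title": new.get("title", ""),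
--                     "from": old.get("severity", ""), "to": new.get("severity", ""),
--                 })
--
--     return result
-- ===== SOURCE B (Python) =====
-- SEVERITY_ORDER = {"Critical": 4, "High": 3, "Medium": 2, "Low": 1, "Informational": 0}
--
-- def _sorted_items(baseline):
--     ids = {f["rule_id"]: f for f in baseline.get("findings", [])
--            if f.get("status", "finding") != "exception"}
--     return sorted(ids.items(), key=lambda kv: kv[0])
--
-- def diff_findings(old_baseline, new_baseline):
--     """Compute new, resolved, escalated, de-escalated findings between two baselines."""
--     old_items = _sorted_items(old_baseline)
--     new_items = _sorted_items(new_baseline)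
--     added, removed, escalated, de_escalated = [], [], [], []
--     i, j = 0, 0
--     # merge join of the two key-sorted item lists: no lookups, no key-set union
--     while i < len(old_items) and j < len(new_items):
--         ok, of = old_items[i]
--         nk, nf = new_items[j]
--         if nk < ok:
--             added.append(nf)
--             j += 1
--         elif ok < nk:
--             removed.append(of)
--             i += 1
--         else:
--             o = SEVERITY_ORDER.get(of.get("severity", ""), 0)
--             n = SEVERITY_ORDER.get(nf.get("severity", ""), 0)
--             if n != o:
--                 change = {"rule_id": ok, "title": nf.get("title", ""),
--                           "from": of.get("severity", ""), "to": nf.get("severity", "")}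
--                 (escalated if n > o else de_escalated).append(change)
--             i += 1
--             j += 1
--     removed.extend(f for _, f in old_items[i:])
--     added.extend(f for _, f in new_items[j:])
--     return {"new": added, "resolved": removed,
--             "escalated": escalated, "de_escalated": de_escalated}
-- ===== Notes on version B (the rewrite author's own statement) =====
-- stated objective: alternative
-- what changed: A iterates the sorted union of the two key sets doing dict lookups and a four-way truthiness branch per key; B sorts the two item lists by rule_id and classifies with a two-pointer merge join (lookup-free: each step compares the two head keys, emitting new/resolved on key mismatch and escalations on key match, with the leftovers extended at the end).
import Mathlib
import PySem

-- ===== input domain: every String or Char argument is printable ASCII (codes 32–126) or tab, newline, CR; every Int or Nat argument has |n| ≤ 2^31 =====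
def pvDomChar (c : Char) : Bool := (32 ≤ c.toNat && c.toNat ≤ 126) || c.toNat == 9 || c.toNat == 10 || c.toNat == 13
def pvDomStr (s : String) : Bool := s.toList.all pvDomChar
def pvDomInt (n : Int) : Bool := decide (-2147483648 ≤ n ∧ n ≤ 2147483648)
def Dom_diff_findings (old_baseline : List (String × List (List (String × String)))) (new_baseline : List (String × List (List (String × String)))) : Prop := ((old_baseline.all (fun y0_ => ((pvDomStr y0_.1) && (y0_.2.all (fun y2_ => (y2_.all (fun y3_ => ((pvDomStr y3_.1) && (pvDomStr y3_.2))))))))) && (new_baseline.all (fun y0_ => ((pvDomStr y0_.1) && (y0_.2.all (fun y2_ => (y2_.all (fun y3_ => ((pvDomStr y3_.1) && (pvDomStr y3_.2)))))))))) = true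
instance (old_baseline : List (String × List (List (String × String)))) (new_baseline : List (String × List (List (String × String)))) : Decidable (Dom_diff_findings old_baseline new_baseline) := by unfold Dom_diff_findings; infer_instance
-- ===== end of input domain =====

-- B replaces A's loop over the sorted key-set union with per-key dict lookups by a two-pointer
-- merge join of the two key-sorted item lists (objective: alternative, lookup-free classification).

-- ===== shared helpers (both Pythons build the id dicts with the same comprehension) =====

-- f.get(k) on a plain dict represented as an assoc list: FIRST match
def pvFGet? (f : List (String × String)) (k : String) : Option String :=
  (f.find? (fun p => p.1 == k)).map (·.2)

-- f.get(k, d)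
def pvFGetD (f : List (String × String)) (k : String) (d : String) : String :=
  (pvFGet? f k).getD d

-- baseline.get("findings", [])
def pvFindings (b : List (String × List (List (String × String)))) : List (List (String × String)) :=
  ((b.find? (fun p => p.1 == "findings")).map (·.2)).getD []

-- {f["rule_id"]: f for f in baseline.get("findings", []) if f.get("status","finding") != "exception"}
-- (a finding without "rule_id" raises KeyError in Python; Pre_ excludes those inputs, here it is skipped)
def pvIds (b : List (String × List (List (String × String)))) : PySem.Dict String (List (String × String)) :=
  (pvFindings b).foldl (fun d f =>
    if pvFGetD f "status" "finding" ≠ "exception" then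
      match pvFGet? f "rule_id" with
      | some rid => d.insert rid f
      | none => d
    else d) PySem.Dict.empty

-- SEVERITY_ORDER.get(s, 0)
def pvSev (s : String) : Int :=
  PySem.Dict.getD (PySem.Dict.ofList [("Critical", (4 : Int)), ("High", 3), ("Medium", 2), ("Low", 1), ("Informational", 0)]) s 0

-- ===== PORT A =====

-- Python truthiness of old_ids.get(rid): None and the empty dict are falsy
def pvTruthy (o : Option (List (String × String))) : Bool :=
  match o with
  | none => false
  | some f => !f.isEmpty

-- A's escalated/de-escalated change record, fields read from the two dicts
def pvChange (oD nD : PySem.Dict String (List (String × String))) (rid : String) : List (String × String) :=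
  [("rule_id", rid), ("title", pvFGetD ((nD.get? rid).getD []) "title" ""),
   ("from", pvFGetD ((oD.get? rid).getD []) "severity" ""), ("to", pvFGetD ((nD.get? rid).getD []) "severity" "")]

-- the body of A's single for-loop over sorted(set(old_ids) | set(new_ids))
def pvStepA (oD nD : PySem.Dict String (List (String × String)))
    (r : List (List (String × String)) × List (List (String × String)) × List (List (String × String)) × List (List (String × String)))
    (rid : String) :
    List (List (String × String)) × List (List (String × String)) × List (List (String × String)) × List (List (String × String)) :=
  let old := oD.get? rid
  let nw := nD.get? rid
  if pvTruthy nw && !pvTruthy old then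
    (r.1 ++ [nw.getD []], r.2.1, r.2.2.1, r.2.2.2)
  else if pvTruthy old && !pvTruthy nw then
    (r.1, r.2.1 ++ [old.getD []], r.2.2.1, r.2.2.2)
  else if pvTruthy old && pvTruthy nw then
    let o := pvSev (pvFGetD (old.getD []) "severity" "")
    let n := pvSev (pvFGetD (nw.getD []) "severity" "")
    if n > o then (r.1, r.2.1, r.2.2.1 ++ [pvChange oD nD rid], r.2.2.2)
    else if n < o then (r.1, r.2.1, r.2.2.1, r.2.2.2 ++ [pvChange oD nD rid])
    else r
  else r

def diff_findings (old_baseline : List (String × List (List (String × String)))) (new_baseline : List (String × List (List (String × String)))) : List (String × List (List (String × String))) :=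
  let old_ids := pvIds old_baseline
  let new_ids := pvIds new_baseline
  let allIds := PySem.List.sorted (PySem.Set.union old_ids.keys new_ids.keys) (fun x => x) false
  let r := allIds.foldl (pvStepA old_ids new_ids) ([], [], [], [])
  [("new", r.1), ("resolved", r.2.1), ("escalated", r.2.2.1), ("de_escalated", r.2.2.2)]

-- ===== PORT B =====

-- B's change record, built from the two merge heads
def pvChangeB (rid : String) (of nf : List (String × String)) : List (String × String) :=
  [("rule_id", rid), ("title", pvFGetD nf "title" ""),
   ("from", pvFGetD of "severity" ""), ("to", pvFGetD nf "severity" "")]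

-- B's while-loop: two-pointer merge join of the key-sorted item lists, plus the two final extends
def pvMergeB (olds news : List (String × List (String × String)))
    (a r e d : List (List (String × String))) :
    List (List (String × String)) × List (List (String × String)) × List (List (String × String)) × List (List (String × String)) :=
  match olds, news with
  | [], news => (a ++ news.map (fun kv => kv.2), r, e, d)
  | o :: ot, [] => (a, r ++ (o :: ot).map (fun kv => kv.2), e, d)
  | (ok, of) :: ot, (nk, nf) :: nt =>
    if nk < ok then pvMergeB ((ok, of) :: ot) nt (a ++ [nf]) r e d
    else if ok < nk then pvMergeB ot ((nk, nf) :: nt) a (r ++ [of]) e d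
    else
      let o := pvSev (pvFGetD of "severity" "")
      let n := pvSev (pvFGetD nf "severity" "")
      if n ≠ o then
        if n > o then pvMergeB ot nt a r (e ++ [pvChangeB ok of nf]) d
        else pvMergeB ot nt a r e (d ++ [pvChangeB ok of nf])
      else pvMergeB ot nt a r e d
termination_by olds.length + news.length

def diff_findings_alt (old_baseline : List (String × List (List (String × String)))) (new_baseline : List (String × List (List (String × String)))) : List (String × List (List (String × String))) :=
  let old_items := PySem.List.sorted (pvIds old_baseline).items (fun kv => kv.1) false
  let new_items := PySem.List.sorted (pvIds new_baseline).items (fun kv => kv.1) false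
  let q := pvMergeB old_items new_items [] [] [] []
  [("new", q.1), ("resolved", q.2.1), ("escalated", q.2.2.1), ("de_escalated", q.2.2.2)]

-- ===== PRECONDITION & SPEC =====

-- A (and B alike) raises KeyError when a finding whose status is not "exception" lacks the
-- "rule_id" key; Pre_ excludes exactly those inputs.
def pvOkFinding (f : List (String × String)) : Bool :=
  pvFGetD f "status" "finding" == "exception" || (pvFGet? f "rule_id").isSome

def Pre_diff_findings (old_baseline : List (String × List (List (String × String)))) (new_baseline : List (String × List (List (String × String)))) : Prop :=
  ((pvFindings old_baseline).all pvOkFinding && (pvFindings new_baseline).all pvOkFinding) = true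

instance (old_baseline : List (String × List (List (String × String)))) (new_baseline : List (String × List (List (String × String)))) : Decidable (Pre_diff_findings old_baseline new_baseline) := by unfold Pre_diff_findings; infer_instance

def pvWitness_diff_findings : (List (String × List (List (String × String)))) × (List (String × List (List (String × String)))) :=
  ([("findings", [[("rule_id", "r1"), ("severity", "Low")]])],
   [("findings", [[("rule_id", "r1"), ("severity", "High")], [("rule_id", "r2")]])])

def Spec_diff_findings (old_baseline : List (String × List (List (String × String)))) (new_baseline : List (String × List (List (String × String)))) (out : List (String × List (List (String × String)))) : Prop := out = diff_findings_alt old_baseline new_baseline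
instance (old_baseline : List (String × List (List (String × String)))) (new_baseline : List (String × List (List (String × String)))) (out : List (String × List (List (String × String)))) : Decidable (Spec_diff_findings old_baseline new_baseline out) := by unfold Spec_diff_findings; infer_instance

-- ===== CLAIM (what is proved, stated in full; the proofs are below) =====
def Claim_equal_diff_findings : Prop := ∀ (old_baseline : List (String × List (List (String × String)))) (new_baseline : List (String × List (List (String × String)))), Dom_diff_findings old_baseline new_baseline → Pre_diff_findings old_baseline new_baseline → Spec_diff_findings old_baseline new_baseline (diff_findings old_baseline new_baseline)

-- ===== LEMMAS AND PROOFS =====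

-- abbreviations for the branch conditions of A's loop (proof-only)
def pNew (oD nD : PySem.Dict String (List (String × String))) (rid : String) : Bool :=
  pvTruthy (nD.get? rid) && !pvTruthy (oD.get? rid)
def pRes (oD nD : PySem.Dict String (List (String × String))) (rid : String) : Bool :=
  pvTruthy (oD.get? rid) && !pvTruthy (nD.get? rid)
def qEsc (oD nD : PySem.Dict String (List (String × String))) (rid : String) : Bool :=
  decide (pvSev (pvFGetD ((nD.get? rid).getD []) "severity" "") > pvSev (pvFGetD ((oD.get? rid).getD []) "severity" ""))
def qDe (oD nD : PySem.Dict String (List (String × String))) (rid : String) : Bool :=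
  decide (pvSev (pvFGetD ((nD.get? rid).getD []) "severity" "") < pvSev (pvFGetD ((oD.get? rid).getD []) "severity" ""))
def pEsc (oD nD : PySem.Dict String (List (String × String))) (rid : String) : Bool :=
  pvTruthy (oD.get? rid) && pvTruthy (nD.get? rid) && qEsc oD nD rid
def pDe (oD nD : PySem.Dict String (List (String × String))) (rid : String) : Bool :=
  pvTruthy (oD.get? rid) && pvTruthy (nD.get? rid) && qDe oD nD rid

-- every value stored by pvIds carries a "rule_id" key, hence is a non-empty assoc list
theorem pvIds_aux (l : List (List (String × String))) (d : PySem.Dict String (List (String × String)))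
    (hd : ∀ rid f, d.get? rid = some f → f ≠ []) (rid : String) (f : List (String × String))
    (h : (l.foldl (fun d f => if pvFGetD f "status" "finding" ≠ "exception" then
        (match pvFGet? f "rule_id" with | some rid => d.insert rid f | none => d) else d) d).get? rid = some f) :
    f ≠ [] := by
  induction l generalizing d with
  | nil => exact hd rid f h
  | cons x l ih =>
    simp only [List.foldl_cons] at h
    refine ih _ ?_ h
    intro rid' f' h'
    split at h'
    · rcases hx : pvFGet? x "rule_id" with _ | k
      · rw [hx] at h'; exact hd rid' f' h'
      · rw [hx] at h'
        rw [PySem.Dict.get?_insert] at h'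
        split at h'
        · cases h'
          intro hnil
          rw [hnil] at hx
          simp [pvFGet?] at hx
        · exact hd rid' f' h'
    · exact hd rid' f' h'

theorem pvIds_val_ne_nil (b : List (String × List (List (String × String)))) (rid : String)
    (f : List (String × String)) (h : (pvIds b).get? rid = some f) : f ≠ [] := by
  refine pvIds_aux _ _ ?_ rid f h
  intro rid f h
  simp [PySem.Dict.get?_empty] at h

theorem pvIds_keys_nodup (b : List (String × List (List (String × String)))) : (pvIds b).keys.Nodup := by
  unfold pvIds
  generalize pvFindings b = l
  have : ∀ (d : PySem.Dict String (List (String × String))), d.keys.Nodup →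
      (l.foldl (fun d f => if pvFGetD f "status" "finding" ≠ "exception" then
        (match pvFGet? f "rule_id" with | some rid => d.insert rid f | none => d) else d) d).keys.Nodup := by
    induction l with
    | nil => intro d hd; exact hd
    | cons x l ih =>
      intro d hd
      simp only [List.foldl_cons]
      apply ih
      split
      · rcases pvFGet? x "rule_id" with _ | k
        · exact hd
        · exact PySem.Dict.nodup_keys_insert _ _ _ hd
      · exact hd
  exact this _ (by simp [PySem.Dict.keys_empty])

theorem truthy_pvIds (b : List (String × List (List (String × String)))) (rid : String) :
    pvTruthy ((pvIds b).get? rid) = true ↔ rid ∈ (pvIds b).keys := by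
  rcases h : (pvIds b).get? rid with _ | f
  · simp only [pvTruthy]
    constructor
    · intro hc; cases hc
    · intro hm
      exact absurd hm ((PySem.Dict.get?_eq_none_iff_not_mem_keys _ _).mp h)
  · have hne := pvIds_val_ne_nil b rid f h
    have hmem : rid ∈ (pvIds b).keys := by
      rw [← PySem.Dict.contains_iff_mem_keys]
      rw [PySem.Dict.contains_eq_isSome_get?, h]
      rfl
    simp only [pvTruthy]
    constructor
    · intro _; exact hmem
    · intro _
      simp [hne]

-- a sorted list of distinct strings is strictly increasing
theorem sorted_strict (s : List String) (hs : s.Nodup) :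
    (PySem.List.sorted s (fun x => x) false).Pairwise (· < ·) := by
  have hnd : (PySem.List.sorted s (fun x => x) false).Nodup :=
    ((PySem.List.sorted_perm s (fun x => x) false).nodup_iff).mpr hs
  have hle : (PySem.List.sorted s (fun x => x) false).Pairwise (fun a b => a ≤ b) :=
    PySem.List.sorted_pairwise s (fun x => x)
  exact (hle.and hnd).imp (fun h => lt_of_le_of_ne h.1 h.2)

-- filter of a sorted nodup list is the sorted filtered list
theorem filter_sorted_set (s : List String) (hs : s.Nodup) (p : String → Bool) :
    (PySem.List.sorted s (fun x => x) false).filter p = PySem.List.sorted (s.filter p) (fun x => x) false := by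
  have hperm : ((PySem.List.sorted s (fun x => x) false).filter p).Perm (s.filter p) :=
    (PySem.List.sorted_perm s (fun x => x) false).filter p
  exact (PySem.List.sorted_eq_of_perm_of_pairwise_lt _ _ _ hperm
    ((sorted_strict s hs).sublist List.filter_sublist)).symm

-- characterisation of A's loop
theorem foldA (oD nD : PySem.Dict String (List (String × String))) (l : List String)
    (a b c d : List (List (String × String))) :
    l.foldl (pvStepA oD nD) (a, b, c, d) =
      (a ++ (l.filter (pNew oD nD)).map (fun rid => (nD.get? rid).getD []),
       b ++ (l.filter (pRes oD nD)).map (fun rid => (oD.get? rid).getD []),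
       c ++ (l.filter (pEsc oD nD)).map (pvChange oD nD),
       d ++ (l.filter (pDe oD nD)).map (pvChange oD nD)) := by
  induction l generalizing a b c d with
  | nil => simp
  | cons x l ih =>
    simp only [List.foldl_cons, List.filter_cons]
    by_cases h1 : pvTruthy (nD.get? x) && !pvTruthy (oD.get? x)
    · have e : pvStepA oD nD (a, b, c, d) x = (a ++ [(nD.get? x).getD []], b, c, d) := by
        simp [pvStepA, h1]
      rw [e, ih]
      have hn : pNew oD nD x = true := h1
      have hr : pRes oD nD x = false := by
        simp only [pNew] at hn
        simp only [pRes]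
        simp_all
      have he : pEsc oD nD x = false := by
        simp only [pNew] at hn
        simp only [pEsc]
        simp_all
      have hd2 : pDe oD nD x = false := by
        simp only [pNew] at hn
        simp only [pDe]
        simp_all
      simp [hn, hr, he, hd2]
    · by_cases h2 : pvTruthy (oD.get? x) && !pvTruthy (nD.get? x)
      · have e : pvStepA oD nD (a, b, c, d) x = (a, b ++ [(oD.get? x).getD []], c, d) := by
          simp only [pvStepA]
          rw [if_neg (by simpa using h1), if_pos h2]
        rw [e, ih]
        have hn : pNew oD nD x = false := by simpa [pNew] using h1
        have hr : pRes oD nD x = true := h2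
        have he : pEsc oD nD x = false := by
          simp only [pRes] at hr
          simp only [pEsc]
          simp_all
        have hd2 : pDe oD nD x = false := by
          simp only [pRes] at hr
          simp only [pDe]
          simp_all
        simp [hn, hr, he, hd2]
      · by_cases h3 : pvTruthy (oD.get? x) && pvTruthy (nD.get? x)
        · by_cases h4 : qEsc oD nD x
          · have e : pvStepA oD nD (a, b, c, d) x = (a, b, c ++ [pvChange oD nD x], d) := by
              simp only [pvStepA]
              rw [if_neg (by simpa using h1), if_neg (by simpa using h2), if_pos h3,
                if_pos (by simpa [qEsc] using h4)]
            rw [e, ih]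
            have hn : pNew oD nD x = false := by simpa [pNew] using h1
            have hr : pRes oD nD x = false := by simpa [pRes] using h2
            have he : pEsc oD nD x = true := by simp [pEsc, h3, h4]
            have hd2 : pDe oD nD x = false := by
              simp only [qEsc, decide_eq_true_eq] at h4
              simp [pDe, qDe]
              omega
            simp [hn, hr, he, hd2]
          · by_cases h5 : qDe oD nD x
            · have e : pvStepA oD nD (a, b, c, d) x = (a, b, c, d ++ [pvChange oD nD x]) := by
                simp only [pvStepA]
                rw [if_neg (by simpa using h1), if_neg (by simpa using h2), if_pos h3,
                  if_neg (by simpa [qEsc] using h4), if_pos (by simpa [qDe] using h5)]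
              rw [e, ih]
              have hn : pNew oD nD x = false := by simpa [pNew] using h1
              have hr : pRes oD nD x = false := by simpa [pRes] using h2
              have he : pEsc oD nD x = false := by simp [pEsc, h4]
              have hd2 : pDe oD nD x = true := by simp [pDe, h3, h5]
              simp [hn, hr, he, hd2]
            · have e : pvStepA oD nD (a, b, c, d) x = (a, b, c, d) := by
                simp only [pvStepA]
                rw [if_neg (by simpa using h1), if_neg (by simpa using h2), if_pos h3,
                  if_neg (by simpa [qEsc] using h4), if_neg (by simpa [qDe] using h5)]
              rw [e, ih]
              have hn : pNew oD nD x = false := by simpa [pNew] using h1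
              have hr : pRes oD nD x = false := by simpa [pRes] using h2
              have he : pEsc oD nD x = false := by simp [pEsc, h4]
              have hd2 : pDe oD nD x = false := by simp [pDe, h5]
              simp [hn, hr, he, hd2]
        · have e : pvStepA oD nD (a, b, c, d) x = (a, b, c, d) := by
            simp only [pvStepA]
            rw [if_neg (by simpa using h1), if_neg (by simpa using h2), if_neg (by simpa using h3)]
          rw [e, ih]
          have hn : pNew oD nD x = false := by simpa [pNew] using h1
          have hr : pRes oD nD x = false := by simpa [pRes] using h2
          have he : pEsc oD nD x = false := by simp [pEsc]; simp_all
          have hd2 : pDe oD nD x = false := by simp [pDe]; simp_all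
          simp [hn, hr, he, hd2]

-- key-list equalities on A's side: the filtered sorted union as a sorted set
theorem keylist_new (ob nb : List (String × List (List (String × String)))) :
    (PySem.List.sorted (PySem.Set.union (pvIds ob).keys (pvIds nb).keys) (fun x => x) false).filter
        (pNew (pvIds ob) (pvIds nb)) =
      PySem.List.sorted (PySem.Set.diff (pvIds nb).keys (pvIds ob).keys) (fun x => x) false := by
  have hu : (PySem.Set.union (pvIds ob).keys (pvIds nb).keys).Nodup :=
    PySem.Set.nodup_union _ _ (pvIds_keys_nodup ob)
  rw [filter_sorted_set _ hu]
  apply PySem.List.sorted_eq_sorted_of_perm _ _ _ (fun a b h => h)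
  rw [List.perm_ext_iff_of_nodup (hu.filter _) (PySem.Set.nodup_diff _ _ (pvIds_keys_nodup nb))]
  intro a
  simp only [List.mem_filter, PySem.Set.mem_union, PySem.Set.mem_diff, pNew]
  constructor
  · rintro ⟨_, hp⟩
    simp only [Bool.and_eq_true, Bool.not_eq_true'] at hp
    exact ⟨(truthy_pvIds nb a).mp hp.1, fun hm => by
      have := (truthy_pvIds ob a).mpr hm
      rw [hp.2] at this
      cases this⟩
  · rintro ⟨h1, h2⟩
    refine ⟨Or.inr h1, ?_⟩
    simp only [Bool.and_eq_true, Bool.not_eq_true']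
    refine ⟨(truthy_pvIds nb a).mpr h1, ?_⟩
    rcases hb : pvTruthy ((pvIds ob).get? a) with _ | _
    · rfl
    · exact absurd ((truthy_pvIds ob a).mp hb) h2

theorem keylist_res (ob nb : List (String × List (List (String × String)))) :
    (PySem.List.sorted (PySem.Set.union (pvIds ob).keys (pvIds nb).keys) (fun x => x) false).filter
        (pRes (pvIds ob) (pvIds nb)) =
      PySem.List.sorted (PySem.Set.diff (pvIds ob).keys (pvIds nb).keys) (fun x => x) false := by
  have hu : (PySem.Set.union (pvIds ob).keys (pvIds nb).keys).Nodup :=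
    PySem.Set.nodup_union _ _ (pvIds_keys_nodup ob)
  rw [filter_sorted_set _ hu]
  apply PySem.List.sorted_eq_sorted_of_perm _ _ _ (fun a b h => h)
  rw [List.perm_ext_iff_of_nodup (hu.filter _) (PySem.Set.nodup_diff _ _ (pvIds_keys_nodup ob))]
  intro a
  simp only [List.mem_filter, PySem.Set.mem_union, PySem.Set.mem_diff, pRes]
  constructor
  · rintro ⟨_, hp⟩
    simp only [Bool.and_eq_true, Bool.not_eq_true'] at hp
    exact ⟨(truthy_pvIds ob a).mp hp.1, fun hm => by
      have := (truthy_pvIds nb a).mpr hm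
      rw [hp.2] at this
      cases this⟩
  · rintro ⟨h1, h2⟩
    refine ⟨Or.inl h1, ?_⟩
    simp only [Bool.and_eq_true, Bool.not_eq_true']
    refine ⟨(truthy_pvIds ob a).mpr h1, ?_⟩
    rcases hb : pvTruthy ((pvIds nb).get? a) with _ | _
    · rfl
    · exact absurd ((truthy_pvIds nb a).mp hb) h2

theorem keylist_common (ob nb : List (String × List (List (String × String))))
    (q : String → Bool) :
    (PySem.List.sorted (PySem.Set.union (pvIds ob).keys (pvIds nb).keys) (fun x => x) false).filter
        (fun rid => pvTruthy ((pvIds ob).get? rid) && pvTruthy ((pvIds nb).get? rid) && q rid) =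
      (PySem.List.sorted (PySem.Set.inter (pvIds ob).keys (pvIds nb).keys) (fun x => x) false).filter q := by
  have hu : (PySem.Set.union (pvIds ob).keys (pvIds nb).keys).Nodup :=
    PySem.Set.nodup_union _ _ (pvIds_keys_nodup ob)
  have hi : (PySem.Set.inter (pvIds ob).keys (pvIds nb).keys).Nodup :=
    PySem.Set.nodup_inter _ _ (pvIds_keys_nodup ob)
  rw [filter_sorted_set _ hu, filter_sorted_set _ hi]
  apply PySem.List.sorted_eq_sorted_of_perm _ _ _ (fun a b h => h)
  refine (List.perm_ext_iff_of_nodup (hu.filter _) (hi.filter _)).mpr ?_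
  intro a
  simp only [List.mem_filter, PySem.Set.mem_union, PySem.Set.mem_inter, Bool.and_eq_true]
  constructor
  · rintro ⟨_, ⟨ho, hn⟩, hq⟩
    exact ⟨⟨(truthy_pvIds ob a).mp ho, (truthy_pvIds nb a).mp hn⟩, hq⟩
  · rintro ⟨⟨h1, h2⟩, hq⟩
    exact ⟨Or.inl h1, ⟨⟨(truthy_pvIds ob a).mpr h1, (truthy_pvIds nb a).mpr h2⟩, hq⟩⟩

-- B's sorted item list is the sorted key list paired with the dict values
theorem sorted_items_eq (d : PySem.Dict String (List (String × String))) (h : d.keys.Nodup) :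
    PySem.List.sorted d.items (fun kv => kv.1) false
      = (PySem.List.sorted d.keys (fun x => x) false).map (fun k => (k, (d.get? k).getD [])) := by
  apply PySem.List.sorted_eq_of_perm_of_pairwise_lt
  · have hit : d.items = d.keys.map (fun k => (k, d.getD k [])) := PySem.Dict.items_eq_map_keys d h []
    rw [hit]
    have := (PySem.List.sorted_perm d.keys (fun x => x) false).map (fun k => (k, d.getD k []))
    simpa [PySem.Dict.getD_eq_get?_getD] using this
  · rw [List.pairwise_map]
    exact sorted_strict d.keys h

-- characterisation of B's merge join over strictly key-increasing lists
theorem mergeB_spec (fo fn : String → List (String × String)) :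
    ∀ (K1 K2 : List String), K1.Pairwise (· < ·) → K2.Pairwise (· < ·) →
    ∀ a r e d,
    pvMergeB (K1.map (fun k => (k, fo k))) (K2.map (fun k => (k, fn k))) a r e d =
      (a ++ (K2.filter (fun k => !K1.contains k)).map fn,
       r ++ (K1.filter (fun k => !K2.contains k)).map fo,
       e ++ ((K1.filter (fun k => K2.contains k)).filter
              (fun k => decide (pvSev (pvFGetD (fn k) "severity" "") > pvSev (pvFGetD (fo k) "severity" "")))).map
            (fun k => pvChangeB k (fo k) (fn k)),
       d ++ ((K1.filter (fun k => K2.contains k)).filter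
              (fun k => decide (pvSev (pvFGetD (fn k) "severity" "") < pvSev (pvFGetD (fo k) "severity" "")))).map
            (fun k => pvChangeB k (fo k) (fn k))) := by
  intro K1
  induction K1 with
  | nil =>
    intro K2 _ _ a r e d
    simp [pvMergeB]
  | cons ok t1 ih1 =>
    intro K2
    induction K2 with
    | nil =>
      intro h1 _ a r e d
      simp [pvMergeB]
    | cons nk t2 ih2 =>
      intro h1 h2 a r e d
      have hok : ∀ y ∈ t1, ok < y := (List.pairwise_cons.mp h1).1
      have ht1 : t1.Pairwise (· < ·) := (List.pairwise_cons.mp h1).2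
      have hnk : ∀ y ∈ t2, nk < y := (List.pairwise_cons.mp h2).1
      have ht2 : t2.Pairwise (· < ·) := (List.pairwise_cons.mp h2).2
      rcases lt_trichotomy nk ok with hlt | heq | hgt
      · -- nk < ok : emit fn nk into "new", keep K1
        have step : pvMergeB ((ok :: t1).map (fun k => (k, fo k))) ((nk :: t2).map (fun k => (k, fn k))) a r e d
            = pvMergeB ((ok :: t1).map (fun k => (k, fo k))) (t2.map (fun k => (k, fn k))) (a ++ [fn nk]) r e d := by
          rw [List.map_cons, List.map_cons, pvMergeB]
          rw [if_pos hlt]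
        rw [step, ih2 h1 ht2]
        have hcN : ((ok :: t1).contains nk) = false := by
          rw [Bool.eq_false_iff]
          intro h
          rcases List.mem_cons.mp (List.contains_iff_mem.mp h) with h' | h'
          · exact absurd h' (ne_of_lt hlt)
          · exact absurd (hok _ h') (lt_asymm hlt)
        have hcg : ∀ k ∈ ok :: t1, ((nk :: t2).contains k) = (t2.contains k) := by
          intro k hk
          have hkk : nk < k := by
            rcases List.mem_cons.mp hk with h' | h'
            · rw [h']; exact hlt
            · exact hlt.trans (hok _ h')
          simp only [List.contains_cons]
          simp
          intro h
          exact absurd h (ne_of_gt hkk)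
        have e1 : (nk :: t2).filter (fun k => !(ok :: t1).contains k)
            = nk :: t2.filter (fun k => !(ok :: t1).contains k) := by
          rw [List.filter_cons, hcN]
          simp
        have e2 : (ok :: t1).filter (fun k => !(nk :: t2).contains k)
            = (ok :: t1).filter (fun k => !t2.contains k) :=
          List.filter_congr (fun k hk => by rw [hcg k hk])
        have e3 : (ok :: t1).filter (fun k => (nk :: t2).contains k)
            = (ok :: t1).filter (fun k => t2.contains k) :=
          List.filter_congr (fun k hk => hcg k hk)
        rw [e1, e2, e3]
        simp [List.append_assoc]
      · -- nk = ok : compare severities, consume both heads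
        subst heq
        have step0 : pvMergeB ((nk :: t1).map (fun k => (k, fo k))) ((nk :: t2).map (fun k => (k, fn k))) a r e d
            = (let o := pvSev (pvFGetD (fo nk) "severity" "")
               let n := pvSev (pvFGetD (fn nk) "severity" "")
               if n ≠ o then
                 if n > o then pvMergeB (t1.map (fun k => (k, fo k))) (t2.map (fun k => (k, fn k))) a r (e ++ [pvChangeB nk (fo nk) (fn nk)]) d
                 else pvMergeB (t1.map (fun k => (k, fo k))) (t2.map (fun k => (k, fn k))) a r e (d ++ [pvChangeB nk (fo nk) (fn nk)])
               else pvMergeB (t1.map (fun k => (k, fo k))) (t2.map (fun k => (k, fn k))) a r e d) := by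
          rw [List.map_cons, List.map_cons, pvMergeB]
          rw [if_neg (lt_irrefl nk), if_neg (lt_irrefl nk)]
        have hcg1 : ∀ k ∈ t2, ((nk :: t1).contains k) = (t1.contains k) := by
          intro k hk
          simp only [List.contains_cons]
          simp
          intro h
          exact absurd h (ne_of_gt (hnk _ hk))
        have hcg2 : ∀ k ∈ t1, ((nk :: t2).contains k) = (t2.contains k) := by
          intro k hk
          simp only [List.contains_cons]
          simp
          intro h
          exact absurd h (ne_of_gt (hok _ hk))
        have e1 : (nk :: t2).filter (fun k => !(nk :: t1).contains k)
            = t2.filter (fun k => !t1.contains k) := by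
          rw [List.filter_cons]
          rw [if_neg (by simp)]
          exact List.filter_congr (fun k hk => by rw [hcg1 k hk])
        have e2 : (nk :: t1).filter (fun k => !(nk :: t2).contains k)
            = t1.filter (fun k => !t2.contains k) := by
          rw [List.filter_cons]
          rw [if_neg (by simp)]
          exact List.filter_congr (fun k hk => by rw [hcg2 k hk])
        have e3 : (nk :: t1).filter (fun k => (nk :: t2).contains k)
            = nk :: t1.filter (fun k => t2.contains k) := by
          rw [List.filter_cons]
          rw [if_pos (by simp)]
          rw [List.filter_congr (fun k hk => hcg2 k hk)]
        rw [step0, e1, e2, e3]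
        set o := pvSev (pvFGetD (fo nk) "severity" "") with ho
        set n := pvSev (pvFGetD (fn nk) "severity" "") with hn
        by_cases hgt : n > o
        · rw [if_pos (by omega : n ≠ o), if_pos hgt, ih1 _ ht1 ht2]
          rw [List.filter_cons, List.filter_cons]
          rw [if_pos (by rw [← hn, ← ho]; simpa using hgt), if_neg (by rw [← hn, ← ho]; simp; omega)]
          simp [List.append_assoc]
        · by_cases hlt2 : n < o
          · rw [if_pos (by omega : n ≠ o), if_neg hgt, ih1 _ ht1 ht2]
            rw [List.filter_cons, List.filter_cons]
            rw [if_neg (by rw [← hn, ← ho]; simp; omega), if_pos (by rw [← hn, ← ho]; simpa using hlt2)]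
            simp [List.append_assoc]
          · rw [if_neg (by omega : ¬ n ≠ o), ih1 _ ht1 ht2]
            rw [List.filter_cons, List.filter_cons]
            rw [if_neg (by rw [← hn, ← ho]; simp; omega), if_neg (by rw [← hn, ← ho]; simp; omega)]
      · -- ok < nk : emit fo ok into "resolved", keep K2
        have step : pvMergeB ((ok :: t1).map (fun k => (k, fo k))) ((nk :: t2).map (fun k => (k, fn k))) a r e d
            = pvMergeB (t1.map (fun k => (k, fo k))) ((nk :: t2).map (fun k => (k, fn k))) a (r ++ [fo ok]) e d := by
          rw [List.map_cons, List.map_cons, pvMergeB]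
          rw [if_neg (lt_asymm hgt), if_pos hgt]
        rw [step, ih1 _ ht1 h2]
        have hcO : ((nk :: t2).contains ok) = false := by
          rw [Bool.eq_false_iff]
          intro h
          rcases List.mem_cons.mp (List.contains_iff_mem.mp h) with h' | h'
          · exact absurd h' (ne_of_lt hgt)
          · exact absurd (hnk _ h') (lt_asymm hgt)
        have hcg : ∀ k ∈ nk :: t2, ((ok :: t1).contains k) = (t1.contains k) := by
          intro k hk
          have hkk : ok < k := by
            rcases List.mem_cons.mp hk with h' | h'
            · rw [h']; exact hgt
            · exact hgt.trans (hnk _ h')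
          simp only [List.contains_cons]
          simp
          intro h
          exact absurd h (ne_of_gt hkk)
        have e1 : (nk :: t2).filter (fun k => !(ok :: t1).contains k)
            = (nk :: t2).filter (fun k => !t1.contains k) :=
          List.filter_congr (fun k hk => by rw [hcg k hk])
        have e2 : (ok :: t1).filter (fun k => !(nk :: t2).contains k)
            = ok :: t1.filter (fun k => !(nk :: t2).contains k) := by
          rw [List.filter_cons, hcO]
          simp
        have e3 : (ok :: t1).filter (fun k => (nk :: t2).contains k)
            = t1.filter (fun k => (nk :: t2).contains k) := by
          rw [List.filter_cons, hcO]
          simp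
        rw [e1, e2, e3]
        simp [List.append_assoc]

-- key-list equalities on B's side: the merge-join filters as sorted sets
theorem filter_not_contains (s t : List String) (hs : s.Nodup) :
    (PySem.List.sorted s (fun x => x) false).filter
        (fun k => !(PySem.List.sorted t (fun x => x) false).contains k)
      = PySem.List.sorted (PySem.Set.diff s t) (fun x => x) false := by
  rw [filter_sorted_set _ hs]
  apply PySem.List.sorted_eq_sorted_of_perm _ _ _ (fun a b h => h)
  rw [List.perm_ext_iff_of_nodup (hs.filter _) (PySem.Set.nodup_diff _ _ hs)]
  intro a
  simp only [List.mem_filter, PySem.Set.mem_diff, Bool.not_eq_true', Bool.eq_false_iff]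
  constructor
  · rintro ⟨h1, h2⟩
    exact ⟨h1, fun hm => h2 (List.contains_iff_mem.mpr ((PySem.List.mem_sorted _ _ _ _).mpr hm))⟩
  · rintro ⟨h1, h2⟩
    exact ⟨h1, fun hc => h2 ((PySem.List.mem_sorted _ _ _ _).mp (List.contains_iff_mem.mp hc))⟩

theorem filter_contains (s t : List String) (hs : s.Nodup) :
    (PySem.List.sorted s (fun x => x) false).filter
        (fun k => (PySem.List.sorted t (fun x => x) false).contains k)
      = PySem.List.sorted (PySem.Set.inter s t) (fun x => x) false := by
  rw [filter_sorted_set _ hs]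
  apply PySem.List.sorted_eq_sorted_of_perm _ _ _ (fun a b h => h)
  rw [List.perm_ext_iff_of_nodup (hs.filter _) (PySem.Set.nodup_inter _ _ hs)]
  intro a
  simp only [List.mem_filter, PySem.Set.mem_inter]
  constructor
  · rintro ⟨h1, h2⟩
    exact ⟨h1, (PySem.List.mem_sorted _ _ _ _).mp (List.contains_iff_mem.mp h2)⟩
  · rintro ⟨h1, h2⟩
    exact ⟨h1, List.contains_iff_mem.mpr ((PySem.List.mem_sorted _ _ _ _).mpr h2)⟩

-- ===== VERDICT (by name: the statement is the Claim_ definition above) =====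
theorem diff_findings_spec : Claim_equal_diff_findings := by
  intro ob nb _ _
  unfold Spec_diff_findings diff_findings diff_findings_alt
  simp only [foldA, List.nil_append]
  rw [keylist_new, keylist_res]
  have e1 : pEsc (pvIds ob) (pvIds nb) = (fun rid => pvTruthy ((pvIds ob).get? rid) && pvTruthy ((pvIds nb).get? rid) && qEsc (pvIds ob) (pvIds nb) rid) := rfl
  have e2 : pDe (pvIds ob) (pvIds nb) = (fun rid => pvTruthy ((pvIds ob).get? rid) && pvTruthy ((pvIds nb).get? rid) && qDe (pvIds ob) (pvIds nb) rid) := rfl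
  rw [e1, e2, keylist_common ob nb (qEsc (pvIds ob) (pvIds nb)), keylist_common ob nb (qDe (pvIds ob) (pvIds nb))]
  rw [sorted_items_eq _ (pvIds_keys_nodup ob), sorted_items_eq _ (pvIds_keys_nodup nb)]
  rw [mergeB_spec (fun k => (((pvIds ob).get? k).getD [])) (fun k => (((pvIds nb).get? k).getD []))
      _ _ (sorted_strict _ (pvIds_keys_nodup ob)) (sorted_strict _ (pvIds_keys_nodup nb))]
  rw [filter_not_contains _ _ (pvIds_keys_nodup nb),
      filter_not_contains _ _ (pvIds_keys_nodup ob),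
      filter_contains _ _ (pvIds_keys_nodup ob)]
  simp only [List.nil_append]
  rfl
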